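-- pv_equiv track=rewrite | github.com/theojoly2/AI4Semantics-MCP-server-fr | tools/index_search/load_documents/load.py | summarize_dependencies
-- ===== SOURCE A (Python) =====
-- def summarize_dependencies(dep_map: dict[str, list[str]]) -> tuple[list[str], list[str]]:
--     flat = []
--     labeled = []
--
--     for rel_type in ["base", "type", "ref", "substitutionGroup", "group_ref", "attributeGroup_ref"]:
--         for item in dep_map.get(rel_type, []):
--             flat.append(item)
--             labeled.append(f"{rel_type}:{item}")
--
--     flat_unique = []
--     seen = set()
--     for item in flat:
--         if item not in seen:
--             seen.add(item)
--             flat_unique.append(item)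
--
--     labeled_unique = []
--     seen = set()
--     for item in labeled:
--         if item not in seen:
--             seen.add(item)
--             labeled_unique.append(item)
--
--     return flat_unique, labeled_unique
-- ===== SOURCE B (Python) =====
-- def summarize_dependencies(dep_map: dict[str, list[str]]) -> tuple[list[str], list[str]]:
--     flat_unique = []
--     labeled_unique = []
--     seen_items = set()
--     seen_labels = set()
--     for rel_type in ["base", "type", "ref", "substitutionGroup", "group_ref", "attributeGroup_ref"]:
--         for item in dep_map.get(rel_type, []):
--             if item not in seen_items:
--                 seen_items.add(item)
--                 flat_unique.append(item)
--             label = f"{rel_type}:{item}"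
--             if label not in seen_labels:
--                 seen_labels.add(label)
--                 labeled_unique.append(label)
--     return flat_unique, labeled_unique
-- ===== Notes on version B (the rewrite author's own statement) =====
-- stated objective: simpler
-- what changed: B fuses A's three passes (build flat, build labeled, then two separate dedup passes) into one single pass over the relation types that appends to both unique lists immediately, maintaining the two seen-sets on the fly and never materialising the intermediate flat/labeled lists.
import Mathlib
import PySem

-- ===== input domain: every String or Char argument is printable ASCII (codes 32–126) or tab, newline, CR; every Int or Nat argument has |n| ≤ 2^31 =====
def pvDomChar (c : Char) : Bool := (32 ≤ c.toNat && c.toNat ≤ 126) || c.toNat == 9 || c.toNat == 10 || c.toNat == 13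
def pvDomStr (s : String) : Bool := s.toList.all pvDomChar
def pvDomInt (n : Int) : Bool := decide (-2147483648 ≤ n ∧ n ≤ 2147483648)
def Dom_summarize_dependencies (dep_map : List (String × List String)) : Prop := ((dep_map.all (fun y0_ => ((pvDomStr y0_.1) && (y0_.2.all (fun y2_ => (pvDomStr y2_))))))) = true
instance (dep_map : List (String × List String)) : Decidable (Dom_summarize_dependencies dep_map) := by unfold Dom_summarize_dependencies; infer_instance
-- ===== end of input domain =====

-- B fuses A's build-then-dedup-twice structure into one pass keeping both seen-sets; same value, same cost (objective: simpler).

-- the fixed relation-type list both Pythons iterate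
def pvRels : List String := ["base", "type", "ref", "substitutionGroup", "group_ref", "attributeGroup_ref"]

-- one step of Python's "if item not in seen: seen.add(item); out.append(item)" (shared idiom of both sources)
def pvDedupStep (st : List String × PySem.Set String) (item : String) : List String × PySem.Set String :=
  if PySem.Set.contains st.2 item then st else (st.1 ++ [item], PySem.Set.add st.2 item)

-- ===== PORT A =====
def summarize_dependencies (dep_map : List (String × List String)) : List String × List String :=
  -- build flat and labeled
  let built := pvRels.foldl (fun (acc : List String × List String) rel =>
      (PySem.Dict.getD (PySem.Dict.mk dep_map) rel []).foldl
        (fun (acc2 : List String × List String) item =>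
          (acc2.1 ++ [item], acc2.2 ++ [rel ++ ":" ++ item])) acc)
    ([], [])
  -- dedup flat
  let fu := (built.1.foldl pvDedupStep ([], PySem.Set.empty)).1
  -- dedup labeled
  let lu := (built.2.foldl pvDedupStep ([], PySem.Set.empty)).1
  (fu, lu)

-- ===== PORT B =====
def summarize_dependencies_alt (dep_map : List (String × List String)) : List String × List String :=
  let st := pvRels.foldl (fun (st : (List String × PySem.Set String) × (List String × PySem.Set String)) rel =>
      (PySem.Dict.getD (PySem.Dict.mk dep_map) rel []).foldl
        (fun st item => (pvDedupStep st.1 item, pvDedupStep st.2 (rel ++ ":" ++ item))) st)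
    (([], PySem.Set.empty), ([], PySem.Set.empty))
  (st.1.1, st.2.1)

-- ===== PRECONDITION & SPEC =====
def Spec_summarize_dependencies (dep_map : List (String × List String)) (out : List String × List String) : Prop := out = summarize_dependencies_alt dep_map
instance (dep_map : List (String × List String)) (out : List String × List String) : Decidable (Spec_summarize_dependencies dep_map out) := by unfold Spec_summarize_dependencies; infer_instance

-- ===== CLAIM (what is proved, stated in full; the proofs are below) =====
def Claim_equal_summarize_dependencies : Prop := ∀ (dep_map : List (String × List String)), Dom_summarize_dependencies dep_map → Spec_summarize_dependencies dep_map (summarize_dependencies dep_map)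

-- ===== LEMMAS AND PROOFS =====

-- A's build loop appends each relation's items (and labels) to the running accumulators
lemma pv_build_inner (items : List String) (rel : String) (f l : List String) :
    items.foldl (fun (acc2 : List String × List String) item =>
        (acc2.1 ++ [item], acc2.2 ++ [rel ++ ":" ++ item])) (f, l)
      = (f ++ items, l ++ items.map (fun i => rel ++ ":" ++ i)) := by
  induction items generalizing f l with
  | nil => simp
  | cons x xs ih => simp [List.foldl_cons, ih]

lemma pv_build (dep_map : List (String × List String)) (rels : List String) (f l : List String) :
    rels.foldl (fun (acc : List String × List String) rel =>
        (PySem.Dict.getD (PySem.Dict.mk dep_map) rel []).foldl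
          (fun (acc2 : List String × List String) item =>
            (acc2.1 ++ [item], acc2.2 ++ [rel ++ ":" ++ item])) acc) (f, l)
      = (f ++ rels.flatMap (fun rel => PySem.Dict.getD (PySem.Dict.mk dep_map) rel []),
         l ++ rels.flatMap (fun rel => (PySem.Dict.getD (PySem.Dict.mk dep_map) rel []).map (fun i => rel ++ ":" ++ i))) := by
  induction rels generalizing f l with
  | nil => simp
  | cons r rs ih => simp [List.foldl_cons, pv_build_inner, ih, List.append_assoc]

-- B's fused inner loop is the product of two independent dedup folds
lemma pv_fuse_inner (items : List String) (rel : String)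
    (p q : List String × PySem.Set String) :
    items.foldl (fun st item => (pvDedupStep st.1 item, pvDedupStep st.2 (rel ++ ":" ++ item))) (p, q)
      = (items.foldl pvDedupStep p,
         (items.map (fun i => rel ++ ":" ++ i)).foldl pvDedupStep q) := by
  induction items generalizing p q with
  | nil => simp
  | cons x xs ih => simp [List.foldl_cons, ih]

-- B's outer loop is the product of the two dedup folds over the flattened streams
lemma pv_fuse (dep_map : List (String × List String)) (rels : List String)
    (p q : List String × PySem.Set String) :
    rels.foldl (fun (st : (List String × PySem.Set String) × (List String × PySem.Set String)) rel =>
        (PySem.Dict.getD (PySem.Dict.mk dep_map) rel []).foldl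
          (fun st item => (pvDedupStep st.1 item, pvDedupStep st.2 (rel ++ ":" ++ item))) st) (p, q)
      = ((rels.flatMap (fun rel => PySem.Dict.getD (PySem.Dict.mk dep_map) rel [])).foldl pvDedupStep p,
         (rels.flatMap (fun rel => (PySem.Dict.getD (PySem.Dict.mk dep_map) rel []).map (fun i => rel ++ ":" ++ i))).foldl pvDedupStep q) := by
  induction rels generalizing p q with
  | nil => simp
  | cons r rs ih => simp [List.foldl_cons, pv_fuse_inner, ih, List.foldl_append]

-- ===== VERDICT (by name: the statement is the Claim_ definition above) =====
theorem summarize_dependencies_spec : Claim_equal_summarize_dependencies := by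
  intro dep_map _
  unfold Spec_summarize_dependencies summarize_dependencies summarize_dependencies_alt
  rw [pv_build, pv_fuse]
  simp
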